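-- pv_equiv track=rewrite | github.com/martian-ai/Dialogue-Robot | solutions/nlu/lexical/trie.py | merge_sub
-- ===== SOURCE A (Python) =====
-- def merge_sub(intervals_sub, intervals_all):
--     tmp = []
--     for item2 in intervals_all:
--         for item1 in intervals_sub:
--             if item1[0] < item2[0] < item1[1] or item1[0] < item2[1] < item1[1]:
--                 tmp.append(item2)
--                 continue
--     return tmp
-- ===== SOURCE B (Python) =====
-- def merge_sub(intervals_sub, intervals_all):
--     subs = sorted(intervals_sub)
--     out = []
--     for q in intervals_all:
--         for iv in subs:
--             if iv[0] >= q[0] and iv[0] >= q[1]: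
--                 break
--             if iv[0] < q[0] < iv[1] or iv[0] < q[1] < iv[1]:
--                 out.append(q)
--     return out
-- ===== Notes on version B (the rewrite author's own statement) =====
-- stated objective: alternative
-- what changed: B sorts the sub-intervals once by left endpoint and, for each query, scans the sorted list emitting the query per containing sub-interval, breaking as soon as left endpoints reach both query endpoints; Pre_ restricts to well-formed intervals (>=2 endpoints) when both lists are nonempty, where malformed intervals almost always make A raise IndexError.
-- outside the precondition, e.g. on merge_sub([[5], [1, 4]], [[2, 3]]): A returns [[2, 3]], B returns [[2, 3]]; on merge_sub([[1, 5]], [[2]]): A returns [[2]], B returns [[2]]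
import Mathlib
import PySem

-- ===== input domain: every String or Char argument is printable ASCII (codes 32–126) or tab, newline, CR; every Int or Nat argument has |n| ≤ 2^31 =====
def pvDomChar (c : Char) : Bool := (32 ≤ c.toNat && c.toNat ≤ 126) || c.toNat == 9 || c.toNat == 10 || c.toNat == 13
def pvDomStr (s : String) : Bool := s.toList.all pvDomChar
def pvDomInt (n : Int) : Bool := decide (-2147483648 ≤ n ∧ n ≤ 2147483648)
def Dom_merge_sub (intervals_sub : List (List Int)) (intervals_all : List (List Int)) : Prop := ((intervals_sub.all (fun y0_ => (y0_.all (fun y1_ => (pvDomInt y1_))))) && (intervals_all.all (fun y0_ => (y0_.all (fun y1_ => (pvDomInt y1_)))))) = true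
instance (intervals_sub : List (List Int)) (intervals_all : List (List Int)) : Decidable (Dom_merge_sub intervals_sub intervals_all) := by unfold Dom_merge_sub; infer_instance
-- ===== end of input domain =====

-- B restructures A's nested scan: it sorts the sub-intervals once and scans each query over the
-- sorted list with an early break once left endpoints reach both query endpoints
-- (objective: alternative; return values proved equal on Pre_).

-- ===== PORT A =====
def merge_sub (intervals_sub : List (List Int)) (intervals_all : List (List Int)) : List (List Int) :=
  intervals_all.foldl (fun tmp item2 =>
    intervals_sub.foldl (fun tmp item1 =>
      if (PySem.List.pyGetD item1 0 0 < PySem.List.pyGetD item2 0 0 ∧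
          PySem.List.pyGetD item2 0 0 < PySem.List.pyGetD item1 1 0) ∨
         (PySem.List.pyGetD item1 0 0 < PySem.List.pyGetD item2 1 0 ∧
          PySem.List.pyGetD item2 1 0 < PySem.List.pyGetD item1 1 0)
      then tmp ++ [item2] else tmp) tmp) []

-- ===== PORT B =====
-- subs = sorted(intervals_sub)   — Python's default list comparison is lexicographic; the
-- LinearOrder on List Int used here is that lexicographic order (exact on the admitted inputs).
def pvSubs (intervals_sub : List (List Int)) : List (List Int) :=
  @PySem.List.sorted (List Int) (List Int) LinearOrder.toPartialOrder.toLT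
    LinearOrder.toDecidableLT intervals_sub (fun x => x) false

-- the inner 'for iv in subs' loop of B, with its break once iv[0] >= q[0] and iv[0] >= q[1]
def pvScan (q : List Int) (out : List (List Int)) : List (List Int) → List (List Int)
  | [] => out
  | iv :: rest =>
      if PySem.List.pyGetD q 0 0 ≤ PySem.List.pyGetD iv 0 0 ∧
         PySem.List.pyGetD q 1 0 ≤ PySem.List.pyGetD iv 0 0 then out
      else pvScan q
        (if (PySem.List.pyGetD iv 0 0 < PySem.List.pyGetD q 0 0 ∧
             PySem.List.pyGetD q 0 0 < PySem.List.pyGetD iv 1 0) ∨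
            (PySem.List.pyGetD iv 0 0 < PySem.List.pyGetD q 1 0 ∧
             PySem.List.pyGetD q 1 0 < PySem.List.pyGetD iv 1 0)
         then out ++ [q] else out) rest

def merge_sub_alt (intervals_sub : List (List Int)) (intervals_all : List (List Int)) : List (List Int) :=
  intervals_all.foldl (fun out q => pvScan q out (pvSubs intervals_sub)) []

-- ===== PRECONDITION & SPEC =====
-- Pre_ restricts to the natural domain: whenever both lists are nonempty every interval must have
-- at least two endpoints; on malformed intervals A almost always raises IndexError, and on the
-- few such inputs where short-circuit evaluation lets A return, B returns the same value anyway.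
def Pre_merge_sub (intervals_sub : List (List Int)) (intervals_all : List (List Int)) : Prop :=
  intervals_sub = [] ∨ intervals_all = [] ∨
    ((∀ l ∈ intervals_sub, 2 ≤ l.length) ∧ (∀ l ∈ intervals_all, 2 ≤ l.length))
instance (intervals_sub : List (List Int)) (intervals_all : List (List Int)) : Decidable (Pre_merge_sub intervals_sub intervals_all) := by unfold Pre_merge_sub; infer_instance

def pvWitness_merge_sub : List (List Int) × List (List Int) := ([[1, 5]], [[2, 3]])

def Spec_merge_sub (intervals_sub : List (List Int)) (intervals_all : List (List Int)) (out : List (List Int)) : Prop := out = merge_sub_alt intervals_sub intervals_all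
instance (intervals_sub : List (List Int)) (intervals_all : List (List Int)) (out : List (List Int)) : Decidable (Spec_merge_sub intervals_sub intervals_all out) := by unfold Spec_merge_sub; infer_instance

-- ===== CLAIM (what is proved, stated in full; the proofs are below) =====
def Claim_equal_merge_sub : Prop := ∀ (intervals_sub : List (List Int)) (intervals_all : List (List Int)), Dom_merge_sub intervals_sub intervals_all → Pre_merge_sub intervals_sub intervals_all → Spec_merge_sub intervals_sub intervals_all (merge_sub intervals_sub intervals_all)

-- ===== LEMMAS AND PROOFS =====

-- A's test on a sub-interval iv against a query q, as a Bool predicate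
def pA (q iv : List Int) : Bool :=
  decide ((PySem.List.pyGetD iv 0 0 < PySem.List.pyGetD q 0 0 ∧
           PySem.List.pyGetD q 0 0 < PySem.List.pyGetD iv 1 0) ∨
          (PySem.List.pyGetD iv 0 0 < PySem.List.pyGetD q 1 0 ∧
           PySem.List.pyGetD q 1 0 < PySem.List.pyGetD iv 1 0))

lemma inner_A (sub : List (List Int)) (q : List Int) :
    ∀ tmp : List (List Int),
      sub.foldl (fun tmp item1 =>
        if (PySem.List.pyGetD item1 0 0 < PySem.List.pyGetD q 0 0 ∧
            PySem.List.pyGetD q 0 0 < PySem.List.pyGetD item1 1 0) ∨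
           (PySem.List.pyGetD item1 0 0 < PySem.List.pyGetD q 1 0 ∧
            PySem.List.pyGetD q 1 0 < PySem.List.pyGetD item1 1 0)
        then tmp ++ [q] else tmp) tmp
      = tmp ++ List.replicate (sub.countP (pA q)) q := by
  induction sub with
  | nil => intro tmp; simp
  | cons iv rest ih =>
      intro tmp
      simp only [List.foldl_cons, List.countP_cons, ih, pA]
      by_cases h : (PySem.List.pyGetD iv 0 0 < PySem.List.pyGetD q 0 0 ∧
            PySem.List.pyGetD q 0 0 < PySem.List.pyGetD iv 1 0) ∨
          (PySem.List.pyGetD iv 0 0 < PySem.List.pyGetD q 1 0 ∧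
            PySem.List.pyGetD q 1 0 < PySem.List.pyGetD iv 1 0)
      · simp [h, List.replicate_succ]
      · simp [h]

lemma char_A (sub all : List (List Int)) :
    merge_sub sub all = all.flatMap (fun q => List.replicate (sub.countP (pA q)) q) := by
  unfold merge_sub
  simp only [inner_A]
  rw [PySem.List.foldl_append_eq_flatMap]
  simp

-- lexicographic ≤ on nonempty int lists is monotone in the first element
lemma head0_le (u v : List Int) (hu : u ≠ []) (hv : v ≠ []) (h : u ≤ v) :
    PySem.List.pyGetD u 0 0 ≤ PySem.List.pyGetD v 0 0 := by
  obtain ⟨a, as, rfl⟩ := List.exists_cons_of_ne_nil hu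
  obtain ⟨b, bs, rfl⟩ := List.exists_cons_of_ne_nil hv
  simp [PySem.List.pyGetD, PySem.List.pyGet?, PySem.List.pyIdx?]
  by_contra hc
  have hba : b < a := by omega
  have hlt : (b::bs : List Int) < (a::as) := by
    rw [List.cons_lt_cons_iff]; left; exact hba
  exact absurd (lt_of_le_of_lt h hlt) (lt_irrefl _)

lemma scan_eq (q : List Int) (subs : List (List Int))
    (hne : ∀ l ∈ subs, l ≠ []) (hpw : subs.Pairwise (fun u v : List Int => u ≤ v)) :
    ∀ out : List (List Int),
      pvScan q out subs = out ++ List.replicate (subs.countP (pA q)) q := by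
  induction subs with
  | nil => intro out; simp [pvScan]
  | cons iv rest ih =>
      intro out
      rw [List.pairwise_cons] at hpw
      obtain ⟨ha, hrest⟩ := hpw
      have hivne : iv ≠ [] := hne iv List.mem_cons_self
      simp only [pvScan]
      split_ifs with hbr hc
      · -- break: nothing in iv::rest matches, its left endpoints all ≥ both query endpoints
        have hz : ((iv :: rest).countP (pA q)) = 0 := by
          rw [List.countP_eq_zero]
          intro r hr
          have h0 : PySem.List.pyGetD iv 0 0 ≤ PySem.List.pyGetD r 0 0 := by
            rcases List.mem_cons.mp hr with h | h
            · subst h; exact le_refl _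
            · exact head0_le iv r hivne (hne r (List.mem_cons_of_mem _ h)) (ha r h)
          simp only [pA, decide_eq_true_eq]
          rintro (⟨h2, h3⟩ | ⟨h2, h3⟩) <;> omega
        rw [hz]; simp
      · have hpa : pA q iv = true := by simp only [pA]; exact decide_eq_true hc
        rw [ih (fun l hl => hne l (List.mem_cons_of_mem _ hl)) hrest, List.countP_cons, hpa]
        simp [List.append_assoc, List.replicate_succ]
      · have hpa : pA q iv = false := by simp only [pA]; exact decide_eq_false hc
        rw [ih (fun l hl => hne l (List.mem_cons_of_mem _ hl)) hrest, List.countP_cons, hpa]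
        simp

lemma char_B (sub all : List (List Int)) (hne : ∀ l ∈ sub, l ≠ []) :
    merge_sub_alt sub all = all.flatMap (fun q => List.replicate (sub.countP (pA q)) q) := by
  unfold merge_sub_alt
  have hperm : (pvSubs sub).Perm sub :=
    @PySem.List.sorted_perm (List Int) (List Int) LinearOrder.toPartialOrder.toLT
      LinearOrder.toDecidableLT sub (fun x => x) false
  have hne' : ∀ l ∈ pvSubs sub, l ≠ [] := fun l hl => hne l (hperm.mem_iff.mp hl)
  have hpw : (pvSubs sub).Pairwise (fun u v : List Int => u ≤ v) :=
    PySem.List.sorted_pairwise sub (fun x => x)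
  have hcnt : ∀ q, (pvSubs sub).countP (pA q) = sub.countP (pA q) :=
    fun q => hperm.countP_eq _
  have hrw := PySem.List.foldl_congr_mem (l := all) (init := ([] : List (List Int)))
    (f := fun out q => pvScan q out (pvSubs sub))
    (g := fun out q => out ++ List.replicate ((pvSubs sub).countP (pA q)) q)
    (fun acc x _ => scan_eq x (pvSubs sub) hne' hpw acc)
  rw [hrw, PySem.List.foldl_append_eq_flatMap]
  simp only [hcnt, List.nil_append]

-- ===== VERDICT (by name: the statement is the Claim_ definition above) =====
theorem merge_sub_spec : Claim_equal_merge_sub := by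
  intro sub all _dom hpre
  unfold Spec_merge_sub
  rcases hpre with hs | ha | ⟨h1, _⟩
  · subst hs
    rw [char_A, char_B _ _ (by intro l hl; cases hl)]
  · subst ha
    rfl
  · rw [char_A, char_B _ _ (fun l hl => by have := h1 l hl; intro h; subst h; simp at this)]
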